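-- pv_equiv track=rewrite | github.com/Kinza-13/ResPred.AI | amr/views.py | _norm_one
-- ===== SOURCE A (Python) =====
-- _PREFIXES = ("sp|", "tr|", "ref|", "gb|", "emb|", "dbj|", "pir|", "pdb|", "lcl|")
--
-- def _norm_one(token: str) -> str:
--     t = (token or "").strip()
--     if not t:
--         return ""
--     # remove leading '>' if present
--     if t.startswith(">"):
--         t = t[1:].strip()
--     # keep only the first whitespace-separated token
--     t = t.split()[0]
--     # lowercase compare
--     t = t.lower()
--     # drop common prefixes (first piece)
--     for p in _PREFIXES:
--         if t.startswith(p):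
--             t = t[len(p):]
--             break
--     return t
-- ===== SOURCE B (Python) =====
-- _PREFIX_NAMES = {"sp", "tr", "ref", "gb", "emb", "dbj", "pir", "pdb", "lcl"}
--
--
-- def _norm_one(token: str) -> str:
--     t = (token or "").strip()
--     if t.startswith(">"):
--         t = t[1:].strip()
--     words = t.split()
--     if not words:
--         return ""
--     t = words[0].lower()
--     parts = t.split("|", 1)
--     if len(parts) == 2 and parts[0] in _PREFIX_NAMES:
--         return parts[1]
--     return t
-- ===== Notes on version B (the rewrite author's own statement) =====
-- stated objective: idiomatic
-- what changed: The sequential loop over nine 'name|' startswith checks (with slice-by-prefix-length) is replaced by a single split on the first '|' plus a set-membership test of the piece before it, and the early-exit guard structure is flattened into early returns.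
import Mathlib
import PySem

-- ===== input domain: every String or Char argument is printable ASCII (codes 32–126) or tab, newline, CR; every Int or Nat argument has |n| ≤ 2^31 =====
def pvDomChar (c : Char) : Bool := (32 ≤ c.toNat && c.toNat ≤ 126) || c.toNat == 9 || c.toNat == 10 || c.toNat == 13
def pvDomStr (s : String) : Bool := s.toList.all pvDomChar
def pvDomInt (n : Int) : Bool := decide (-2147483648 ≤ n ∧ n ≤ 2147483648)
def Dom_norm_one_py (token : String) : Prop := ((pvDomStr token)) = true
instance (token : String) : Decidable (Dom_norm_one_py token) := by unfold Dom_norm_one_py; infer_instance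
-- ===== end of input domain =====

-- B replaces A's sequential loop over nine 'name|' startswith checks by one split on the
-- first '|' plus a set-membership test (more idiomatic; same cost).

-- ===== PORT A =====
def normA_prefixes : List String := ["sp|", "tr|", "ref|", "gb|", "emb|", "dbj|", "pir|", "pdb|", "lcl|"]

-- the 'for p in _PREFIXES: if t.startswith(p): t = t[len(p):]; break' loop
def normA_drop : List String → String → String
  | [], t => t
  | p :: ps, t =>
    if PySem.Str.startswith t p then PySem.Str.slice t (some (PySem.Str.len p)) none
    else normA_drop ps t

def norm_one_py (token : String) : String :=
  let t := PySem.Str.strip token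
  if t = "" then ""
  else
    let t := if PySem.Str.startswith t ">" then PySem.Str.strip (PySem.Str.slice t (some 1) none) else t
    match PySem.List.pyGet? (PySem.Str.split₀ t) 0 with
    | none => ""   -- t.split()[0] raises IndexError in Python here; excluded by Pre_
    | some w => normA_drop normA_prefixes (PySem.Str.lower w)

-- ===== PORT B =====
def normB_names : PySem.Set String :=
  PySem.Set.ofList ["sp", "tr", "ref", "gb", "emb", "dbj", "pir", "pdb", "lcl"]

def norm_one_py_alt (token : String) : String :=
  let t := PySem.Str.strip token
  let t := if PySem.Str.startswith t ">" then PySem.Str.strip (PySem.Str.slice t (some 1) none) else t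
  match PySem.Str.split₀ t with
  | [] => ""
  | w :: _ =>
    let t := PySem.Str.lower w
    match PySem.Str.splitMax? t "|" 1 with
    | some [a, b] => if PySem.Set.contains normB_names a then b else t
    | _ => t

-- ===== PRECONDITION & SPEC =====
-- Pre_ excludes exactly the inputs whose stripped form is ">", on which A's t.split()[0]
-- raises IndexError.
def Pre_norm_one_py (token : String) : Prop := PySem.Str.strip token ≠ ">"
instance (token : String) : Decidable (Pre_norm_one_py token) := by unfold Pre_norm_one_py; infer_instance
def pvWitness_norm_one_py : String := ">sp|Q9XYZ desc"

def Spec_norm_one_py (token : String) (out : String) : Prop := out = norm_one_py_alt token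
instance (token : String) (out : String) : Decidable (Spec_norm_one_py token out) := by unfold Spec_norm_one_py; infer_instance

-- ===== CLAIM (what is proved, stated in full; the proofs are below) =====
def Claim_equal_norm_one_py : Prop := ∀ (token : String), Dom_norm_one_py token → Pre_norm_one_py token → Spec_norm_one_py token (norm_one_py token)

-- ===== LEMMAS AND PROOFS =====

-- position of the first '|' in a list of chars
def firstBar : List Char → Option (List Char × List Char)
  | [] => none
  | c :: rest => if c = '|' then some ([], rest) else (firstBar rest).map (fun p => (c :: p.1, p.2))

theorem firstBar_none_iff (l : List Char) : firstBar l = none ↔ '|' ∉ l := by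
  induction l with
  | nil => simp [firstBar]
  | cons c rest ih =>
    by_cases h : c = '|'
    · subst h; simp [firstBar]
    · simp [firstBar, h, Option.map_eq_none_iff, ih, Ne.symm h]

theorem firstBar_spec (l u v : List Char) (h : firstBar l = some (u, v)) :
    l = u ++ '|' :: v ∧ '|' ∉ u := by
  induction l generalizing u with
  | nil => simp [firstBar] at h
  | cons c rest ih =>
    by_cases hc : c = '|'
    · simp [firstBar, hc] at h
      obtain ⟨h1, h2⟩ := h
      subst h1; subst h2; subst hc; simp
    · rw [firstBar, if_neg hc, Option.map_eq_some_iff] at h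
      obtain ⟨⟨u', v'⟩, hp, heq⟩ := h
      simp only [Prod.mk.injEq] at heq
      obtain ⟨h1, h2⟩ := heq
      subst h1; subst h2
      obtain ⟨hl, hnb⟩ := ih u' hp
      refine ⟨by simp [hl], ?_⟩
      simp [hnb, Ne.symm hc]

theorem go_m0 (fuel : Nat) (v : List Char) (acc : List (List Char)) :
    PySem.Chars.splitOnMax.go ['|'] fuel 0 v [] acc = (v :: acc).reverse := by
  cases fuel <;> cases v <;> simp [PySem.Chars.splitOnMax.go]

theorem go_one (l : List Char) : ∀ (fuel : Nat) (cur : List Char) (acc : List (List Char)),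
    l.length < fuel →
    PySem.Chars.splitOnMax.go ['|'] fuel 1 l cur acc =
      match firstBar l with
      | none => ((cur.reverse ++ l) :: acc).reverse
      | some (u, v) => ((cur.reverse ++ u) :: acc).reverse ++ [v] := by
  induction l with
  | nil =>
    intro fuel cur acc hf
    cases fuel with
    | zero => omega
    | succ f => simp [PySem.Chars.splitOnMax.go, firstBar]
  | cons c rest ih =>
    intro fuel cur acc hf
    cases fuel with
    | zero => omega
    | succ f =>
      by_cases hc : c = '|'
      · subst hc
        have hpre : List.isPrefixOf ['|'] ('|' :: rest) = true := by
          simp [List.isPrefixOf]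
        simp only [PySem.Chars.splitOnMax.go, hpre]
        simp [go_m0, firstBar]
      · have hpre : List.isPrefixOf ['|'] (c :: rest) = false := by
          simp only [List.isPrefixOf, Bool.and_true, beq_eq_false_iff_ne]
          exact fun h => hc h.symm
        simp only [PySem.Chars.splitOnMax.go, hpre]
        have hlen : rest.length < f := by simp at hf; omega
        rw [if_neg (by norm_num), if_neg (by simp)]
        rw [ih f (c :: cur) acc hlen]
        cases h : firstBar rest with
        | none => simp [firstBar, hc, h]
        | some p =>
          obtain ⟨u, v⟩ := p
          simp [firstBar, hc, h]

theorem splitOnMax_bar (s : List Char) :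
    PySem.Chars.splitOnMax s ['|'] 1 =
      match firstBar s with
      | none => [s]
      | some (u, v) => [u, v] := by
  unfold PySem.Chars.splitOnMax
  rw [if_neg (by norm_num)]
  rw [show ((1 : Int).toNat) = 1 from rfl]
  rw [go_one s (s.length + 1) [] [] (by omega)]
  cases h : firstBar s with
  | none => simp
  | some p => obtain ⟨u, v⟩ := p; simp

-- the first '|' decides which prefix 'name|' can be a prefix of the string
theorem prefix_bar_aux (n : List Char) : ∀ (u v : List Char), '|' ∉ n → '|' ∉ u →
    (n ++ ['|']) <+: (u ++ '|' :: v) → n = u := by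
  induction n with
  | nil =>
    intro u v hn hu h
    cases u with
    | nil => rfl
    | cons c u' =>
      rw [List.nil_append, List.cons_append, List.cons_prefix_cons] at h
      exact absurd (by rw [h.1]; simp) hu
  | cons a n' ihn =>
    intro u v hn hu h
    cases u with
    | nil =>
      rw [List.cons_append, List.nil_append, List.cons_prefix_cons] at h
      exact absurd (by rw [← h.1]; simp) hn
    | cons c u' =>
      rw [List.cons_append, List.cons_append, List.cons_prefix_cons] at h
      have := ihn u' v (fun hm => hn (List.mem_cons_of_mem _ hm)) (fun hm => hu (List.mem_cons_of_mem _ hm)) h.2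
      rw [h.1, this]

-- the first '|' decides which prefix 'name|' can be a prefix of the string
theorem prefix_of_bar (n u v : List Char) (hn : '|' ∉ n) (hu : '|' ∉ u) :
    List.isPrefixOf (n ++ ['|']) (u ++ '|' :: v) = true ↔ n = u := by
  rw [List.isPrefixOf_iff_prefix]
  constructor
  · exact fun h => prefix_bar_aux n u v hn hu h
  · rintro rfl
    simp

theorem startswith_false_of_no_bar (s : String) (hs : '|' ∉ s.toList)
    (L : List String) (hL : ∀ p ∈ L, '|' ∈ p.toList) :
    normA_drop L s = s := by
  induction L with
  | nil => rfl
  | cons p ps ih =>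
    have hfalse : PySem.Str.startswith s p = false := by
      rw [PySem.Str.startswith_eq]
      by_contra h
      simp only [Bool.not_eq_false] at h
      have hpref : p.toList <+: s.toList := by
        rwa [PySem.Chars.startswith, List.isPrefixOf_iff_prefix] at h
      exact hs (hpref.subset (hL p (by simp)))
    simp only [normA_drop, hfalse]
    exact ih (fun q hq => hL q (by simp [hq])) |>.trans rfl

-- B's split result, as strings
theorem splitMax?_bar (t : String) :
    PySem.Str.splitMax? t "|" 1 =
      match firstBar t.toList with
      | none => some [t]
      | some (u, v) => some [String.ofList u, String.ofList v] := by
  have hmap := PySem.Str.splitMax?_map t "|" 1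
  rw [show ("|" : String).toList = ['|'] from rfl] at hmap
  rw [PySem.Chars.splitMax?, if_neg (by simp), splitOnMax_bar] at hmap
  cases h : firstBar t.toList with
  | none =>
    rw [h] at hmap
    cases hsp : PySem.Str.splitMax? t "|" 1 with
    | none => rw [hsp] at hmap; simp at hmap
    | some l =>
      rw [hsp] at hmap; simp at hmap
      match l, hmap with
      | [x], hmap =>
        simp at hmap
        have : x = t := String.toList_inj.mp (by simp [hmap])
        simp [this]
  | some p =>
    obtain ⟨u, v⟩ := p
    rw [h] at hmap
    cases hsp : PySem.Str.splitMax? t "|" 1 with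
    | none => rw [hsp] at hmap; simp at hmap
    | some l =>
      rw [hsp] at hmap; simp at hmap
      match l, hmap with
      | [x, y], hmap =>
        simp at hmap
        obtain ⟨hx, hy⟩ := hmap
        have hx' : x = String.ofList u := String.toList_inj.mp (by simp [hx])
        have hy' : y = String.ofList v := String.toList_inj.mp (by simp [hy])
        simp [hx', hy']

theorem normA_drop_of_all_false (L : List String) (t : String)
    (h : ∀ p ∈ L, PySem.Str.startswith t p = false) : normA_drop L t = t := by
  induction L with
  | nil => rfl
  | cons p ps ih =>
    rw [normA_drop, if_neg (by rw [h p (by simp)]; simp)]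
    exact ih (fun q hq => h q (by simp [hq]))

-- the core: A's prefix loop equals B's split-plus-set-lookup, for every string
theorem drop_eq (t : String) :
    normA_drop normA_prefixes t =
      (match PySem.Str.splitMax? t "|" 1 with
       | some [a, b] => if PySem.Set.contains normB_names a then b else t
       | _ => t) := by
  rw [splitMax?_bar]
  cases h : firstBar t.toList with
  | none =>
    have hnb : '|' ∉ t.toList := (firstBar_none_iff _).mp h
    exact startswith_false_of_no_bar t hnb normA_prefixes (by decide)
  | some p =>
    obtain ⟨u, v⟩ := p
    obtain ⟨ht, hu⟩ := firstBar_spec _ _ _ h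
    show normA_drop normA_prefixes t =
      if PySem.Set.contains normB_names (String.ofList u) then String.ofList v else t
    by_cases h1 : u = "sp".toList
    · subst h1
      rw [if_pos (by decide)]
      simp only [normA_prefixes, normA_drop]
      rw [if_pos (by rw [PySem.Str.startswith_eq, PySem.Chars.startswith, ht]; simp [List.isPrefixOf])]
      apply String.toList_inj.mp
      rw [PySem.Str.toList_slice, PySem.Chars.slice, show PySem.Str.len "sp|" = ((3 : Nat) : Int) from by decide, PySem.List.slice_from_natCast, ht]
      simp
    by_cases h2 : u = "tr".toList
    · subst h2
      rw [if_pos (by decide)]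
      simp only [normA_prefixes, normA_drop]
      rw [if_neg (by rw [PySem.Str.startswith_eq, PySem.Chars.startswith, ht]; simp [List.isPrefixOf])]
      rw [if_pos (by rw [PySem.Str.startswith_eq, PySem.Chars.startswith, ht]; simp [List.isPrefixOf])]
      apply String.toList_inj.mp
      rw [PySem.Str.toList_slice, PySem.Chars.slice, show PySem.Str.len "tr|" = ((3 : Nat) : Int) from by decide, PySem.List.slice_from_natCast, ht]
      simp
    by_cases h3 : u = "ref".toList
    · subst h3
      rw [if_pos (by decide)]
      simp only [normA_prefixes, normA_drop]
      rw [if_neg (by rw [PySem.Str.startswith_eq, PySem.Chars.startswith, ht]; simp [List.isPrefixOf])]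
      rw [if_neg (by rw [PySem.Str.startswith_eq, PySem.Chars.startswith, ht]; simp [List.isPrefixOf])]
      rw [if_pos (by rw [PySem.Str.startswith_eq, PySem.Chars.startswith, ht]; simp [List.isPrefixOf])]
      apply String.toList_inj.mp
      rw [PySem.Str.toList_slice, PySem.Chars.slice, show PySem.Str.len "ref|" = ((4 : Nat) : Int) from by decide, PySem.List.slice_from_natCast, ht]
      simp
    by_cases h4 : u = "gb".toList
    · subst h4
      rw [if_pos (by decide)]
      simp only [normA_prefixes, normA_drop]
      rw [if_neg (by rw [PySem.Str.startswith_eq, PySem.Chars.startswith, ht]; simp [List.isPrefixOf])]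
      rw [if_neg (by rw [PySem.Str.startswith_eq, PySem.Chars.startswith, ht]; simp [List.isPrefixOf])]
      rw [if_neg (by rw [PySem.Str.startswith_eq, PySem.Chars.startswith, ht]; simp [List.isPrefixOf])]
      rw [if_pos (by rw [PySem.Str.startswith_eq, PySem.Chars.startswith, ht]; simp [List.isPrefixOf])]
      apply String.toList_inj.mp
      rw [PySem.Str.toList_slice, PySem.Chars.slice, show PySem.Str.len "gb|" = ((3 : Nat) : Int) from by decide, PySem.List.slice_from_natCast, ht]
      simp
    by_cases h5 : u = "emb".toList
    · subst h5
      rw [if_pos (by decide)]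
      simp only [normA_prefixes, normA_drop]
      rw [if_neg (by rw [PySem.Str.startswith_eq, PySem.Chars.startswith, ht]; simp [List.isPrefixOf])]
      rw [if_neg (by rw [PySem.Str.startswith_eq, PySem.Chars.startswith, ht]; simp [List.isPrefixOf])]
      rw [if_neg (by rw [PySem.Str.startswith_eq, PySem.Chars.startswith, ht]; simp [List.isPrefixOf])]
      rw [if_neg (by rw [PySem.Str.startswith_eq, PySem.Chars.startswith, ht]; simp [List.isPrefixOf])]
      rw [if_pos (by rw [PySem.Str.startswith_eq, PySem.Chars.startswith, ht]; simp [List.isPrefixOf])]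
      apply String.toList_inj.mp
      rw [PySem.Str.toList_slice, PySem.Chars.slice, show PySem.Str.len "emb|" = ((4 : Nat) : Int) from by decide, PySem.List.slice_from_natCast, ht]
      simp
    by_cases h6 : u = "dbj".toList
    · subst h6
      rw [if_pos (by decide)]
      simp only [normA_prefixes, normA_drop]
      rw [if_neg (by rw [PySem.Str.startswith_eq, PySem.Chars.startswith, ht]; simp [List.isPrefixOf])]
      rw [if_neg (by rw [PySem.Str.startswith_eq, PySem.Chars.startswith, ht]; simp [List.isPrefixOf])]
      rw [if_neg (by rw [PySem.Str.startswith_eq, PySem.Chars.startswith, ht]; simp [List.isPrefixOf])]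
      rw [if_neg (by rw [PySem.Str.startswith_eq, PySem.Chars.startswith, ht]; simp [List.isPrefixOf])]
      rw [if_neg (by rw [PySem.Str.startswith_eq, PySem.Chars.startswith, ht]; simp [List.isPrefixOf])]
      rw [if_pos (by rw [PySem.Str.startswith_eq, PySem.Chars.startswith, ht]; simp [List.isPrefixOf])]
      apply String.toList_inj.mp
      rw [PySem.Str.toList_slice, PySem.Chars.slice, show PySem.Str.len "dbj|" = ((4 : Nat) : Int) from by decide, PySem.List.slice_from_natCast, ht]
      simp
    by_cases h7 : u = "pir".toList
    · subst h7
      rw [if_pos (by decide)]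
      simp only [normA_prefixes, normA_drop]
      rw [if_neg (by rw [PySem.Str.startswith_eq, PySem.Chars.startswith, ht]; simp [List.isPrefixOf])]
      rw [if_neg (by rw [PySem.Str.startswith_eq, PySem.Chars.startswith, ht]; simp [List.isPrefixOf])]
      rw [if_neg (by rw [PySem.Str.startswith_eq, PySem.Chars.startswith, ht]; simp [List.isPrefixOf])]
      rw [if_neg (by rw [PySem.Str.startswith_eq, PySem.Chars.startswith, ht]; simp [List.isPrefixOf])]
      rw [if_neg (by rw [PySem.Str.startswith_eq, PySem.Chars.startswith, ht]; simp [List.isPrefixOf])]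
      rw [if_neg (by rw [PySem.Str.startswith_eq, PySem.Chars.startswith, ht]; simp [List.isPrefixOf])]
      rw [if_pos (by rw [PySem.Str.startswith_eq, PySem.Chars.startswith, ht]; simp [List.isPrefixOf])]
      apply String.toList_inj.mp
      rw [PySem.Str.toList_slice, PySem.Chars.slice, show PySem.Str.len "pir|" = ((4 : Nat) : Int) from by decide, PySem.List.slice_from_natCast, ht]
      simp
    by_cases h8 : u = "pdb".toList
    · subst h8
      rw [if_pos (by decide)]
      simp only [normA_prefixes, normA_drop]
      rw [if_neg (by rw [PySem.Str.startswith_eq, PySem.Chars.startswith, ht]; simp [List.isPrefixOf])]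
      rw [if_neg (by rw [PySem.Str.startswith_eq, PySem.Chars.startswith, ht]; simp [List.isPrefixOf])]
      rw [if_neg (by rw [PySem.Str.startswith_eq, PySem.Chars.startswith, ht]; simp [List.isPrefixOf])]
      rw [if_neg (by rw [PySem.Str.startswith_eq, PySem.Chars.startswith, ht]; simp [List.isPrefixOf])]
      rw [if_neg (by rw [PySem.Str.startswith_eq, PySem.Chars.startswith, ht]; simp [List.isPrefixOf])]
      rw [if_neg (by rw [PySem.Str.startswith_eq, PySem.Chars.startswith, ht]; simp [List.isPrefixOf])]
      rw [if_neg (by rw [PySem.Str.startswith_eq, PySem.Chars.startswith, ht]; simp [List.isPrefixOf])]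
      rw [if_pos (by rw [PySem.Str.startswith_eq, PySem.Chars.startswith, ht]; simp [List.isPrefixOf])]
      apply String.toList_inj.mp
      rw [PySem.Str.toList_slice, PySem.Chars.slice, show PySem.Str.len "pdb|" = ((4 : Nat) : Int) from by decide, PySem.List.slice_from_natCast, ht]
      simp
    by_cases h9 : u = "lcl".toList
    · subst h9
      rw [if_pos (by decide)]
      simp only [normA_prefixes, normA_drop]
      rw [if_neg (by rw [PySem.Str.startswith_eq, PySem.Chars.startswith, ht]; simp [List.isPrefixOf])]
      rw [if_neg (by rw [PySem.Str.startswith_eq, PySem.Chars.startswith, ht]; simp [List.isPrefixOf])]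
      rw [if_neg (by rw [PySem.Str.startswith_eq, PySem.Chars.startswith, ht]; simp [List.isPrefixOf])]
      rw [if_neg (by rw [PySem.Str.startswith_eq, PySem.Chars.startswith, ht]; simp [List.isPrefixOf])]
      rw [if_neg (by rw [PySem.Str.startswith_eq, PySem.Chars.startswith, ht]; simp [List.isPrefixOf])]
      rw [if_neg (by rw [PySem.Str.startswith_eq, PySem.Chars.startswith, ht]; simp [List.isPrefixOf])]
      rw [if_neg (by rw [PySem.Str.startswith_eq, PySem.Chars.startswith, ht]; simp [List.isPrefixOf])]
      rw [if_neg (by rw [PySem.Str.startswith_eq, PySem.Chars.startswith, ht]; simp [List.isPrefixOf])]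
      rw [if_pos (by rw [PySem.Str.startswith_eq, PySem.Chars.startswith, ht]; simp [List.isPrefixOf])]
      apply String.toList_inj.mp
      rw [PySem.Str.toList_slice, PySem.Chars.slice, show PySem.Str.len "lcl|" = ((4 : Nat) : Int) from by decide, PySem.List.slice_from_natCast, ht]
      simp
    -- u is none of the nine prefix names
    have hstart : ∀ p ∈ normA_prefixes, PySem.Str.startswith t p = false := by
      intro p hp
      rw [PySem.Str.startswith_eq, PySem.Chars.startswith, ht, Bool.eq_false_iff]
      fin_cases hp
      · rw [show ("sp|" : String).toList = "sp".toList ++ ['|'] from by decide]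
        exact fun hc => h1 (((prefix_of_bar _ u v (by decide) hu).mp hc).symm)
      · rw [show ("tr|" : String).toList = "tr".toList ++ ['|'] from by decide]
        exact fun hc => h2 (((prefix_of_bar _ u v (by decide) hu).mp hc).symm)
      · rw [show ("ref|" : String).toList = "ref".toList ++ ['|'] from by decide]
        exact fun hc => h3 (((prefix_of_bar _ u v (by decide) hu).mp hc).symm)
      · rw [show ("gb|" : String).toList = "gb".toList ++ ['|'] from by decide]
        exact fun hc => h4 (((prefix_of_bar _ u v (by decide) hu).mp hc).symm)
      · rw [show ("emb|" : String).toList = "emb".toList ++ ['|'] from by decide]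
        exact fun hc => h5 (((prefix_of_bar _ u v (by decide) hu).mp hc).symm)
      · rw [show ("dbj|" : String).toList = "dbj".toList ++ ['|'] from by decide]
        exact fun hc => h6 (((prefix_of_bar _ u v (by decide) hu).mp hc).symm)
      · rw [show ("pir|" : String).toList = "pir".toList ++ ['|'] from by decide]
        exact fun hc => h7 (((prefix_of_bar _ u v (by decide) hu).mp hc).symm)
      · rw [show ("pdb|" : String).toList = "pdb".toList ++ ['|'] from by decide]
        exact fun hc => h8 (((prefix_of_bar _ u v (by decide) hu).mp hc).symm)
      · rw [show ("lcl|" : String).toList = "lcl".toList ++ ['|'] from by decide]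
        exact fun hc => h9 (((prefix_of_bar _ u v (by decide) hu).mp hc).symm)
    have hcon : PySem.Set.contains normB_names (String.ofList u) = false := by
      rw [show normB_names = ["sp", "tr", "ref", "gb", "emb", "dbj", "pir", "pdb", "lcl"] from by decide,
          Bool.eq_false_iff]
      intro hc
      simp only [PySem.Set.contains, List.contains_eq_mem, decide_eq_true_eq, List.mem_cons,
        List.not_mem_nil, or_false] at hc
      rcases hc with hc | hc | hc | hc | hc | hc | hc | hc | hc
      · exact h1 (by rw [← String.toList_ofList (l := u), hc])
      · exact h2 (by rw [← String.toList_ofList (l := u), hc])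
      · exact h3 (by rw [← String.toList_ofList (l := u), hc])
      · exact h4 (by rw [← String.toList_ofList (l := u), hc])
      · exact h5 (by rw [← String.toList_ofList (l := u), hc])
      · exact h6 (by rw [← String.toList_ofList (l := u), hc])
      · exact h7 (by rw [← String.toList_ofList (l := u), hc])
      · exact h8 (by rw [← String.toList_ofList (l := u), hc])
      · exact h9 (by rw [← String.toList_ofList (l := u), hc])
    rw [hcon, if_neg (by simp), normA_drop_of_all_false normA_prefixes t hstart]

theorem norm_one_py_spec : Claim_equal_norm_one_py := by
  intro token _ _
  show norm_one_py token = norm_one_py_alt token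
  simp only [norm_one_py, norm_one_py_alt]
  by_cases h0 : PySem.Str.strip token = ""
  · rw [h0]
    decide
  · rw [if_neg h0]
    generalize (if PySem.Str.startswith (PySem.Str.strip token) ">" then
        PySem.Str.strip (PySem.Str.slice (PySem.Str.strip token) (some 1) none)
      else PySem.Str.strip token) = t
    cases hsp : PySem.Str.split₀ t with
    | nil => simp [PySem.List.pyGet?]
    | cons w ws =>
      have hget : PySem.List.pyGet? (w :: ws) (0 : Int) = some w := by
        simp [PySem.List.pyGet?, PySem.List.pyIdx?]
      rw [hget]
      exact drop_eq (PySem.Str.lower w)
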